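-- pv_equiv track=rewrite | github.com/Krishnaag23/narrative-core | src/story_blueprint/episode_mapper.py | _distribute_plot_points
-- ===== SOURCE A (Python) =====
-- from typing import Dict, List, Optional, Tuple
--
-- def _distribute_plot_points(plot_points: List[Dict], episode_count: int) -> List[List[Dict]]:
--     """Distribute plot points across episodes."""
--     episode_plot_points = [[] for _ in range(episode_count)]
--
--     # Simple distribution - divide points evenly
--     points_per_episode = len(plot_points) // episode_count
--     remainder = len(plot_points) % episode_count
--
--     point_index = 0
--     for episode_index in range(episode_count):
--         points_for_this_episode = points_per_episode
--         if episode_index < remainder: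
--             points_for_this_episode += 1
--
--         for _ in range(points_for_this_episode):
--             if point_index < len(plot_points):
--                 episode_plot_points[episode_index].append(plot_points[point_index])
--                 point_index += 1
--
--     return episode_plot_points
-- ===== SOURCE B (Python) =====
-- from typing import Dict, List
--
-- def _distribute_plot_points(plot_points: List[Dict], episode_count: int) -> List[List[Dict]]:
--     """Distribute plot points across episodes using closed-form slice boundaries."""
--     q, r = divmod(len(plot_points), episode_count)
--     return [plot_points[i * q + min(i, r): (i + 1) * q + min(i + 1, r)]
--             for i in range(episode_count)]
-- ===== Notes on version B (the rewrite author's own statement) =====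
-- stated objective: simpler
-- what changed: Replaces A's pre-built list of empty buckets, running point_index counter and per-element inner append loop with a single comprehension whose slice boundaries i*q+min(i,r) are computed in closed form from divmod.
import Mathlib
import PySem

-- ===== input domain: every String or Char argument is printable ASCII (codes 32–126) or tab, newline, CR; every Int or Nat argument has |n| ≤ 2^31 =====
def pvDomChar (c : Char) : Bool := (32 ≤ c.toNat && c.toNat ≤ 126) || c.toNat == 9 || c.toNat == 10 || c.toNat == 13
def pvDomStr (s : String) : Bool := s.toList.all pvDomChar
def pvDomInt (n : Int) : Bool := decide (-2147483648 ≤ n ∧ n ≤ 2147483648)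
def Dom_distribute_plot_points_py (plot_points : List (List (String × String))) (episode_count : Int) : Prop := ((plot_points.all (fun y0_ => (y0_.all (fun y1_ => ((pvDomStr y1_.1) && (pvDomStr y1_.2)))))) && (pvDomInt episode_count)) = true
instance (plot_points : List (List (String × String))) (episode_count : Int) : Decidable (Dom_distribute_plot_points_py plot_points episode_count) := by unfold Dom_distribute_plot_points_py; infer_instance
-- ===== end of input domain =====

-- B replaces A's running point_index counter and inner append loop by closed-form
-- slice boundaries i*q + min(i,r); objective: simpler.


-- ===== PORT A =====
-- point_index only ever starts at 0 and is incremented, so it is carried as a Nat.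
def distribute_plot_points_py (plot_points : List (List (String × String))) (episode_count : Int) : List (List (List (String × String))) :=
  let init : List (List (List (String × String))) := (PySem.List.pyRange 0 episode_count 1).map (fun _ => [])
  let points_per_episode := PySem.Int.floordiv (plot_points.length : Int) episode_count
  let remainder := PySem.Int.mod (plot_points.length : Int) episode_count
  let res := (PySem.List.pyRange 0 episode_count 1).foldl
    (fun (st : List (List (List (String × String))) × Nat) episode_index =>
      let points_for_this_episode :=
        if episode_index < remainder then points_per_episode + 1 else points_per_episode
      (PySem.List.pyRange 0 points_for_this_episode 1).foldl
        (fun st _ =>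
          if st.2 < plot_points.length then
            (PySem.List.pySetD st.1 episode_index
               (PySem.List.pyGetD st.1 episode_index [] ++ [plot_points.getD st.2 []]),
             st.2 + 1)
          else st) st)
    (init, 0)
  res.1

-- ===== PORT B =====
def distribute_plot_points_py_alt (plot_points : List (List (String × String))) (episode_count : Int) : List (List (List (String × String))) :=
  let q := PySem.Int.floordiv (plot_points.length : Int) episode_count
  let r := PySem.Int.mod (plot_points.length : Int) episode_count
  (PySem.List.pyRange 0 episode_count 1).map (fun i =>
    PySem.List.slice plot_points (some (i * q + min i r)) (some ((i + 1) * q + min (i + 1) r)))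

-- ===== PRECONDITION & SPEC =====
-- Both Pythons raise ZeroDivisionError at episode_count = 0; nothing else is excluded.
def Pre_distribute_plot_points_py (plot_points : List (List (String × String))) (episode_count : Int) : Prop := episode_count ≠ 0
instance (plot_points : List (List (String × String))) (episode_count : Int) : Decidable (Pre_distribute_plot_points_py plot_points episode_count) := by unfold Pre_distribute_plot_points_py; infer_instance

def pvWitness_distribute_plot_points_py : (List (List (String × String))) × Int :=
  ([[("a", "b")], [("c", "d")], [("e", "f")]], 2)

def Spec_distribute_plot_points_py (plot_points : List (List (String × String))) (episode_count : Int) (out : List (List (List (String × String)))) : Prop := out = distribute_plot_points_py_alt plot_points episode_count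
instance (plot_points : List (List (String × String))) (episode_count : Int) (out : List (List (List (String × String)))) : Decidable (Spec_distribute_plot_points_py plot_points episode_count out) := by unfold Spec_distribute_plot_points_py; infer_instance

-- ===== CLAIM (what is proved, stated in full; the proofs are below) =====
def Claim_equal_distribute_plot_points_py : Prop := ∀ (plot_points : List (List (String × String))) (episode_count : Int), Dom_distribute_plot_points_py plot_points episode_count → Pre_distribute_plot_points_py plot_points episode_count → Spec_distribute_plot_points_py plot_points episode_count (distribute_plot_points_py plot_points episode_count)

-- ===== LEMMAS AND PROOFS =====

-- The slice B assigns to episode j (Nat form), used as the invariant's description of A's buckets.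
def pvChunk {β : Type} (pp : List β) (q r : Nat) (j : Nat) : List β :=
  (pp.drop (j * q + min j r)).take (q + if j < r then 1 else 0)

-- A's inner loop appends the next k points to bucket ei and advances the counter by k.
theorem pv_inner {β : Type} (pp : List β) (d : β) (L : List (List β)) (ei idx k : Nat)
    (hL : ei < L.length) (hk : idx + k ≤ pp.length) :
    (PySem.List.pyRange 0 (k : Int) 1).foldl
      (fun (st : List (List β) × Nat) _ =>
        if st.2 < pp.length then
          (PySem.List.pySetD st.1 (ei : Int)
             (PySem.List.pyGetD st.1 (ei : Int) [] ++ [pp.getD st.2 d]), st.2 + 1)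
        else st) (L, idx)
    = (L.set ei (L[ei] ++ (pp.drop idx).take k), idx + k) := by
  induction k with
  | zero =>
      simp [PySem.List.pyRange_one_eq_nil, List.set_getElem_self hL]
  | succ k ih =>
      have hcast : ((k + 1 : Nat) : Int) = (k : Int) + 1 := by push_cast; ring
      rw [hcast, PySem.List.pyRange_one_succ_right (by positivity), List.foldl_append,
          ih (by omega)]
      have hlt : idx + k < pp.length := by omega
      have hM : ei < (L.set ei (L[ei] ++ (pp.drop idx).take k)).length := by simpa using hL
      simp only [List.foldl_cons, List.foldl_nil, hlt, if_pos,
        PySem.List.pySetD_natCast, PySem.List.pyGetD_natCast]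
      rw [List.getD_eq_getElem _ _ hM, List.getElem_set_self hM, List.set_set,
          List.getD_eq_getElem _ _ hlt]
      have hdk : k < (pp.drop idx).length := by simp [List.length_drop]; omega
      have hget : pp[idx + k]'hlt = (pp.drop idx)[k]'hdk := by simp
      rw [List.append_assoc, hget, ← List.take_succ_eq_append_getElem hdk]
      rfl

-- Nat bookkeeping for the closed-form boundaries.
theorem pv_start_succ (q r j : Nat) :
    (j + 1) * q + min (j + 1) r = (j * q + min j r) + (q + if j < r then 1 else 0) := by
  have : (j + 1) * q = j * q + q := by ring
  rw [this]; split_ifs with h <;> omega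

theorem pv_width (q r j : Nat) :
    ((j + 1) * q + min (j + 1) r) - (j * q + min j r) = q + if j < r then 1 else 0 := by
  rw [pv_start_succ]; omega

-- A's outer loop, after m episodes: the first m buckets hold their chunks, the counter is at the m-th boundary.
theorem pv_outer {β : Type} (pp : List β) (d : β) (E q r : Nat) (hE : 0 < E)
    (hq : q = pp.length / E) (hr : r = pp.length % E) (m : Nat) (hm : m ≤ E) :
    (PySem.List.pyRange 0 (m : Int) 1).foldl
      (fun (st : List (List β) × Nat) episode_index =>
        (PySem.List.pyRange 0
            (if episode_index < (r : Int) then (q : Int) + 1 else (q : Int)) 1).foldl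
          (fun st _ =>
            if st.2 < pp.length then
              (PySem.List.pySetD st.1 episode_index
                 (PySem.List.pyGetD st.1 episode_index [] ++ [pp.getD st.2 d]), st.2 + 1)
            else st) st)
      ((List.range E).map (fun _ => ([] : List β)), 0)
    = ((List.range E).map (fun j => if j < m then pvChunk pp q r j else []),
       m * q + min m r) := by
  induction m with
  | zero =>
      simp [PySem.List.pyRange_one_eq_nil]
  | succ m ih =>
      have hmE : m < E := by omega
      have hrE : r < E := by rw [hr]; exact Nat.mod_lt _ hE
      have hn : E * q + r = pp.length := by rw [hq, hr]; exact Nat.div_add_mod _ _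
      have hbound : (m * q + min m r) + (q + if m < r then 1 else 0) ≤ pp.length := by
        rw [← pv_start_succ]
        calc (m + 1) * q + min (m + 1) r ≤ E * q + r := by
              have := Nat.mul_le_mul_right q (show m + 1 ≤ E by omega)
              have := min_le_right (m + 1) r
              omega
          _ = pp.length := hn
      have hcast : ((m + 1 : Nat) : Int) = (m : Int) + 1 := by push_cast; ring
      rw [hcast, PySem.List.pyRange_one_succ_right (by positivity), List.foldl_append,
          ih (by omega)]
      simp only [List.foldl_cons, List.foldl_nil]
      have hpts : (if (m : Int) < (r : Int) then (q : Int) + 1 else (q : Int))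
          = ((q + if m < r then 1 else 0 : Nat) : Int) := by
        split_ifs <;> push_cast <;> omega
      have hLlen : m < ((List.range E).map
          (fun j => if j < m then pvChunk pp q r j else ([] : List β))).length := by
        simpa using hmE
      rw [hpts, pv_inner pp d _ m _ _ hLlen hbound]
      have hentry : ((List.range E).map
          (fun j => if j < m then pvChunk pp q r j else ([] : List β)))[m]'hLlen = [] := by
        simp
      rw [Prod.mk.injEq]
      refine ⟨?_, ?_⟩
      · rw [hentry, List.nil_append]
        apply List.ext_getElem
        · simp
        · intro i h1 h2
          simp only [List.getElem_set, List.getElem_map, List.getElem_range]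
          by_cases hi : i = m
          · subst hi
            simp [pvChunk]
          · have hmi : ¬ m = i := by omega
            have : (i < m + 1) ↔ (i < m) := by omega
            simp [hmi, this]
      · rw [← pv_start_succ]

-- ===== VERDICT (by name: the statement is the Claim_ definition above) =====
theorem distribute_plot_points_py_spec : Claim_equal_distribute_plot_points_py := by
  intro pp ec _ hpre
  unfold Spec_distribute_plot_points_py
  rcases lt_or_gt_of_ne hpre with hneg | hpos
  · simp [distribute_plot_points_py, distribute_plot_points_py_alt,
      PySem.List.pyRange_one_eq_nil (le_of_lt hneg)]
  · obtain ⟨E, rfl⟩ : ∃ E : Nat, ec = (E : Int) :=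
      ⟨ec.toNat, (Int.toNat_of_nonneg hpos.le).symm⟩
    have hE : 0 < E := by exact_mod_cast hpos
    simp only [distribute_plot_points_py, distribute_plot_points_py_alt,
      PySem.Int.floordiv_natCast, PySem.Int.mod_natCast, PySem.List.pyRange_zero_nat,
      List.map_map, Function.comp_def]
    rw [show ((List.range E).map (fun k : Nat => ((fun _ => ([] : List (List (String × String)))) (k : Int))) : List (List (List (String × String))))
          = (List.range E).map (fun _ => ([] : List (List (String × String)))) from rfl]
    rw [show ((List.range E).map (fun k : Nat => (k : Int)) : List Int)
          = PySem.List.pyRange 0 (E : Int) 1 from (PySem.List.pyRange_zero_nat E).symm]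
    rw [pv_outer pp [] E (pp.length / E) (pp.length % E) hE rfl rfl E le_rfl]
    apply List.map_congr_left
    intro j hj
    have hjE : j < E := List.mem_range.mp hj
    rw [if_pos hjE]
    have h1 : ((j : Int) * ((pp.length / E : Nat) : Int) + min (j : Int) ((pp.length % E : Nat) : Int))
        = ((j * (pp.length / E) + min j (pp.length % E) : Nat) : Int) := by push_cast; ring
    have h2 : (((j : Int) + 1) * ((pp.length / E : Nat) : Int) + min ((j : Int) + 1) ((pp.length % E : Nat) : Int))
        = (((j + 1) * (pp.length / E) + min (j + 1) (pp.length % E) : Nat) : Int) := by push_cast; ring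
    simp only [h1, h2, PySem.List.slice_natCast, pv_width, pvChunk]
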